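-- pv_equiv track=rewrite | github.com/OpenChristianData/open-christian-data | build/parsers/gutenberg_theology.py | gather_paragraphs
-- ===== SOURCE A (Python) =====
-- def gather_paragraphs(lines: list, start: int, stop: int) -> list:
--     """Collect paragraphs (blank-line-separated blocks) from lines[start:stop].
--
--     Each paragraph is a single string (lines joined with space).
--     Short lines that are numbering markers (e.g., 'II. ') are absorbed into
--     the following paragraph.
--     """
--     paragraphs = []
--     current_block = []
--
--     for i in range(start, min(stop, len(lines))):
--         l = lines[i].rstrip()
--         stripped = l.strip()
--
--         if not stripped:
--             # Blank line: flush current block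
--             if current_block:
--                 text = " ".join(current_block)
--                 text = " ".join(text.split())  # normalize whitespace
--                 if text:
--                     paragraphs.append(text)
--                 current_block = []
--         else:
--             current_block.append(stripped)
--
--     # Flush any remaining
--     if current_block:
--         text = " ".join(current_block)
--         text = " ".join(text.split())
--         if text:
--             paragraphs.append(text)
--
--     return paragraphs
-- ===== SOURCE B (Python) =====
-- def gather_paragraphs(lines: list, start: int, stop: int) -> list:
--     """Split the in-range lines into maximal runs of non-blank lines and emit
--     one space-joined paragraph per run (run scanner instead of accumulate-flush)."""
--     ws = [lines[i].split() for i in range(start, min(stop, len(lines)))]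
--     paragraphs = []
--     i, n = 0, len(ws)
--     while i < n:
--         if ws[i]:
--             words = []
--             while i < n and ws[i]:
--                 words += ws[i]
--                 i += 1
--             paragraphs.append(" ".join(words))
--         else:
--             i += 1
--     return paragraphs
-- ===== Notes on version B (the rewrite author's own statement) =====
-- stated objective: alternative
-- what changed: Replaces A's accumulate-and-flush state machine (with its duplicated trailing flush and re-split normalization) by splitting each in-range line into words up front and then scanning maximal runs of non-blank lines, emitting one space-joined paragraph per run.
import Mathlib
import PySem

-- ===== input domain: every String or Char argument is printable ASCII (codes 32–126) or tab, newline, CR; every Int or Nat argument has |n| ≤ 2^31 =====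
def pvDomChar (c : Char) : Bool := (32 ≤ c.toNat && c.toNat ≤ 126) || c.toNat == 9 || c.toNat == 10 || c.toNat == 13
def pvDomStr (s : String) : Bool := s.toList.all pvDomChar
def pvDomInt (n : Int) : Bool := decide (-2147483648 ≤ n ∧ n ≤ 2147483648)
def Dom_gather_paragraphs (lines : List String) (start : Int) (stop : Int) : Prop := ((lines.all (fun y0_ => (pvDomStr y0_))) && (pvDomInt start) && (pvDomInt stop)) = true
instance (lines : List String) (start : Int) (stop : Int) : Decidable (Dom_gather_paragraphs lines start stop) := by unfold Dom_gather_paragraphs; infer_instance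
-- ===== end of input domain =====

-- B replaces A's accumulate-and-flush state machine (with its duplicated trailing flush)
-- by splitting each in-range line into words first and then scanning maximal runs of
-- non-blank lines, emitting one paragraph per run (objective: alternative decomposition).

-- ===== PORT A =====
def gather_paragraphs (lines : List String) (start : Int) (stop : Int) : List String :=
  let st :=
    (PySem.List.pyRange start (min stop (lines.length : Int)) 1).foldl
      (fun (st : List String × List String) i =>
        let l := PySem.Str.rstrip (PySem.List.pyGetD lines i "")
        let stripped := PySem.Str.strip l
        if stripped = "" then
          if st.2 ≠ [] then
            let text := PySem.Str.join " " st.2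
            let text := PySem.Str.join " " (PySem.Str.split₀ text)
            (if text ≠ "" then st.1 ++ [text] else st.1, ([] : List String))
          else st
        else (st.1, st.2 ++ [stripped]))
      ([], [])
  if st.2 ≠ [] then
    let text := PySem.Str.join " " st.2
    let text := PySem.Str.join " " (PySem.Str.split₀ text)
    if text ≠ "" then st.1 ++ [text] else st.1
  else st.1

-- ===== PORT B =====
-- inner `while i < n and ws[i]:` loop of Source B: extend `words` while the next word list is non-empty
def pvTakeRun (acc : List String) : List (List String) → List String × List (List String)
  | [] => (acc, [])
  | w :: rest => if w = [] then (acc, w :: rest) else pvTakeRun (acc ++ w) rest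

-- termination measure for the outer while loop (cited by pvScanRuns's decreasing_by)
theorem pvTakeRun_snd_length (acc : List String) (ws : List (List String)) :
    (pvTakeRun acc ws).2.length ≤ ws.length := by
  induction ws generalizing acc with
  | nil => simp [pvTakeRun]
  | cons w rest ih =>
    by_cases h : w = [] <;> simp [pvTakeRun, h]
    exact (ih (acc ++ w)).trans (Nat.le_succ _)

-- outer `while i < n:` loop of Source B over the word lists
def pvScanRuns : List (List String) → List String
  | [] => []
  | w :: rest =>
    if w = [] then pvScanRuns rest
    else PySem.Str.join " " (pvTakeRun w rest).1 :: pvScanRuns (pvTakeRun w rest).2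
termination_by ws => ws.length
decreasing_by
  · simp
  · have := pvTakeRun_snd_length w rest
    simp
    omega

def gather_paragraphs_alt (lines : List String) (start : Int) (stop : Int) : List String :=
  let ws := (PySem.List.pyRange start (min stop (lines.length : Int)) 1).map
    (fun i => PySem.Str.split₀ (PySem.List.pyGetD lines i ""))
  pvScanRuns ws

-- ===== PRECONDITION & SPEC =====
-- Pre_ excludes exactly the inputs on which Python A raises IndexError (start below
-- -len(lines) with a non-empty index range); B raises the same IndexError there.
def Pre_gather_paragraphs (lines : List String) (start : Int) (stop : Int) : Prop :=
  -(lines.length : Int) ≤ start ∨ min stop (lines.length : Int) ≤ start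
instance (lines : List String) (start : Int) (stop : Int) : Decidable (Pre_gather_paragraphs lines start stop) := by unfold Pre_gather_paragraphs; infer_instance

def pvWitness_gather_paragraphs : List String × Int × Int := (["a"], 0, 1)

def Spec_gather_paragraphs (lines : List String) (start : Int) (stop : Int) (out : List String) : Prop := out = gather_paragraphs_alt lines start stop
instance (lines : List String) (start : Int) (stop : Int) (out : List String) : Decidable (Spec_gather_paragraphs lines start stop out) := by unfold Spec_gather_paragraphs; infer_instance

-- ===== CLAIM (what is proved, stated in full; the proofs are below) =====
def Claim_equal_gather_paragraphs : Prop := ∀ (lines : List String) (start : Int) (stop : Int), Dom_gather_paragraphs lines start stop → Pre_gather_paragraphs lines start stop → Spec_gather_paragraphs lines start stop (gather_paragraphs lines start stop)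

-- ===== LEMMAS AND PROOFS =====

-- ---- char-level facts about Python's whitespace split ----

theorem pvGo_acc (s : List Char) : ∀ (cur : List Char) (acc : List (List Char)),
    PySem.Chars.split₀.go s cur acc = acc.reverse ++ PySem.Chars.split₀.go s cur [] := by
  induction s with
  | nil =>
    intro cur acc
    by_cases h : cur.isEmpty <;> simp [PySem.Chars.split₀.go, h]
  | cons c s ih =>
    intro cur acc
    by_cases hc : PySem.Chars.isspace c
    · by_cases h : cur.isEmpty
      · simpa only [PySem.Chars.split₀.go, hc, h, if_true] using ih [] acc
      · simp only [PySem.Chars.split₀.go, hc, h, if_true, Bool.false_eq_true, if_false]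
        rw [ih [] (cur.reverse :: acc), ih [] [cur.reverse]]
        simp
    · simp only [PySem.Chars.split₀.go, hc, Bool.false_eq_true, if_false]
      exact ih (c :: cur) acc

theorem pvGo_append_space (xs : List Char) : ∀ (ys : List Char) (cur : List Char),
    PySem.Chars.split₀.go (xs ++ ' ' :: ys) cur [] =
      PySem.Chars.split₀.go xs cur [] ++ PySem.Chars.split₀.go ys [] [] := by
  induction xs with
  | nil =>
    intro ys cur
    by_cases h : cur.isEmpty
    · simp [PySem.Chars.split₀.go, h, show PySem.Chars.isspace ' ' = true from rfl]
    · have e1 : PySem.Chars.split₀.go ([] ++ ' ' :: ys) cur []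
          = PySem.Chars.split₀.go ys [] [cur.reverse] := by
        simp [PySem.Chars.split₀.go, h, show PySem.Chars.isspace ' ' = true from rfl]
      have e2 : PySem.Chars.split₀.go [] cur [] = [cur.reverse] := by
        simp [PySem.Chars.split₀.go, h]
      rw [e1, e2, pvGo_acc ys [] [cur.reverse]]
      simp
  | cons c xs ih =>
    intro ys cur
    by_cases hc : PySem.Chars.isspace c
    · by_cases h : cur.isEmpty
      · simpa only [List.cons_append, PySem.Chars.split₀.go, hc, h, if_true] using ih ys []
      · simp only [List.cons_append, PySem.Chars.split₀.go, hc, h, if_true, Bool.false_eq_true,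
          if_false]
        rw [pvGo_acc _ [] [cur.reverse], ih, pvGo_acc xs [] [cur.reverse]]
        simp
    · simp only [List.cons_append, PySem.Chars.split₀.go, hc, Bool.false_eq_true, if_false]
      exact ih ys (c :: cur)

theorem pvSplit_append_space (xs ys : List Char) :
    PySem.Chars.split₀ (xs ++ ' ' :: ys) = PySem.Chars.split₀ xs ++ PySem.Chars.split₀ ys := by
  simp only [PySem.Chars.split₀]
  exact pvGo_append_space xs ys []

theorem pvSplit_join_space (blks : List (List Char)) :
    PySem.Chars.split₀ (PySem.Chars.join [' '] blks) = blks.flatMap PySem.Chars.split₀ := by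
  induction blks with
  | nil => simp [PySem.Chars.join_nil, PySem.Chars.split₀, PySem.Chars.split₀.go]
  | cons a l ih =>
    cases l with
    | nil => simp [PySem.Chars.join_singleton]
    | cons b t =>
      rw [PySem.Chars.join_cons_cons]
      rw [show a ++ [' '] ++ PySem.Chars.join [' '] (b :: t)
            = a ++ ' ' :: PySem.Chars.join [' '] (b :: t) by simp]
      rw [pvSplit_append_space, ih]
      simp

theorem pvGo_allspace (t : List Char) (ht : ∀ c ∈ t, PySem.Chars.isspace c) :
    ∀ (cur : List Char),
    PySem.Chars.split₀.go t cur [] = PySem.Chars.split₀.go [] cur [] := by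
  induction t with
  | nil => intro cur; rfl
  | cons c t ih =>
    intro cur
    have hc : PySem.Chars.isspace c := ht c (List.mem_cons_self)
    have ht' : ∀ c ∈ t, PySem.Chars.isspace c := fun x hx => ht x (List.mem_cons_of_mem _ hx)
    by_cases h : cur.isEmpty
    · simpa only [PySem.Chars.split₀.go, hc, h, if_true] using ih ht' []
    · simp only [PySem.Chars.split₀.go, hc, h, if_true, Bool.false_eq_true, if_false]
      rw [pvGo_acc, ih ht' []]
      simp [PySem.Chars.split₀.go]

theorem pvGo_append_allspace (t : List Char) (ht : ∀ c ∈ t, PySem.Chars.isspace c)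
    (xs : List Char) : ∀ (cur : List Char),
    PySem.Chars.split₀.go (xs ++ t) cur [] = PySem.Chars.split₀.go xs cur [] := by
  induction xs with
  | nil => intro cur; simpa using pvGo_allspace t ht cur
  | cons c xs ih =>
    intro cur
    by_cases hc : PySem.Chars.isspace c
    · by_cases h : cur.isEmpty
      · simpa only [List.cons_append, PySem.Chars.split₀.go, hc, h, if_true] using ih []
      · simp only [List.cons_append, PySem.Chars.split₀.go, hc, h, if_true, Bool.false_eq_true,
          if_false]
        rw [pvGo_acc _ [] [cur.reverse], ih, pvGo_acc xs [] [cur.reverse]]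
    · simp only [List.cons_append, PySem.Chars.split₀.go, hc, Bool.false_eq_true, if_false]
      exact ih (c :: cur)

theorem pvRstrip_decomp (s : List Char) :
    s = PySem.Chars.rstrip s ++ (s.reverse.takeWhile PySem.Chars.isspace).reverse := by
  rw [PySem.Chars.rstrip, ← List.reverse_append, List.takeWhile_append_dropWhile,
    List.reverse_reverse]

theorem pvSplit_rstrip (s : List Char) :
    PySem.Chars.split₀ (PySem.Chars.rstrip s) = PySem.Chars.split₀ s := by
  conv_rhs => rw [pvRstrip_decomp s]
  simp only [PySem.Chars.split₀]
  rw [pvGo_append_allspace _ (fun c hc => List.mem_takeWhile_imp (List.mem_reverse.mp hc))]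

theorem pvSplit_lstrip (s : List Char) :
    PySem.Chars.split₀ (PySem.Chars.lstrip s) = PySem.Chars.split₀ s := by
  induction s with
  | nil => rfl
  | cons c s ih =>
    by_cases hc : PySem.Chars.isspace c
    · simpa [PySem.Chars.lstrip, PySem.Chars.split₀, PySem.Chars.split₀.go, hc]
        using ih
    · simp [PySem.Chars.lstrip, hc]

theorem pvSplit_strip (s : List Char) :
    PySem.Chars.split₀ (PySem.Chars.strip s) = PySem.Chars.split₀ s := by
  rw [PySem.Chars.strip, pvSplit_rstrip, pvSplit_lstrip]

theorem pvGo_ne_nil (s : List Char) : ∀ (cur : List Char), cur ≠ [] →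
    PySem.Chars.split₀.go s cur [] ≠ [] := by
  induction s with
  | nil =>
    intro cur hcur
    have h : cur.isEmpty = false := by simpa [List.isEmpty_iff] using hcur
    simp [PySem.Chars.split₀.go, h]
  | cons c s ih =>
    intro cur hcur
    have h : cur.isEmpty = false := by simpa [List.isEmpty_iff] using hcur
    by_cases hc : PySem.Chars.isspace c
    · simp only [PySem.Chars.split₀.go, hc, h, if_true, Bool.false_eq_true, if_false]
      rw [pvGo_acc]
      simp
    · simp only [PySem.Chars.split₀.go, hc, Bool.false_eq_true, if_false]
      exact ih (c :: cur) (by simp)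

theorem pvSplit_eq_nil_iff (s : List Char) :
    PySem.Chars.split₀ s = [] ↔ ∀ c ∈ s, PySem.Chars.isspace c := by
  induction s with
  | nil => simp [PySem.Chars.split₀, PySem.Chars.split₀.go]
  | cons c s ih =>
    by_cases hc : PySem.Chars.isspace c
    · simp only [PySem.Chars.split₀, PySem.Chars.split₀.go, hc, List.isEmpty_nil, if_true]
      simpa [hc] using ih
    · constructor
      · intro h
        exact absurd h (by
          simpa only [PySem.Chars.split₀, PySem.Chars.split₀.go, hc, Bool.false_eq_true,
            if_false] using pvGo_ne_nil s [c] (by simp))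
      · intro h
        exact absurd (h c List.mem_cons_self) hc

theorem pvAllspace_of_rstrip_eq_nil (s : List Char) (h : PySem.Chars.rstrip s = []) :
    ∀ c ∈ s, PySem.Chars.isspace c := by
  intro c hc
  have h' : ∀ x ∈ s.reverse, PySem.Chars.isspace x := by
    rw [PySem.Chars.rstrip] at h
    have : s.reverse.dropWhile PySem.Chars.isspace = [] := by
      simpa using congrArg List.reverse h
    exact List.dropWhile_eq_nil_iff.mp this
  exact h' c (List.mem_reverse.mpr hc)

theorem pvStrip_rstrip_eq_nil_iff (s : List Char) :
    PySem.Chars.strip (PySem.Chars.rstrip s) = [] ↔ ∀ c ∈ s, PySem.Chars.isspace c := by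
  constructor
  · intro h c hc
    -- strip y = rstrip (lstrip y) = [] with y = rstrip s
    rw [PySem.Chars.strip] at h
    have h1 : ∀ x ∈ PySem.Chars.lstrip (PySem.Chars.rstrip s), PySem.Chars.isspace x :=
      pvAllspace_of_rstrip_eq_nil _ h
    have h2 : ∀ x ∈ PySem.Chars.rstrip s, PySem.Chars.isspace x := by
      intro x hx
      rw [← List.takeWhile_append_dropWhile (p := PySem.Chars.isspace)
        (l := PySem.Chars.rstrip s)] at hx
      rcases List.mem_append.mp hx with hx | hx
      · exact List.mem_takeWhile_imp hx
      · exact h1 x hx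
    have h3 : ∀ x ∈ s, PySem.Chars.isspace x := by
      intro x hx
      rw [pvRstrip_decomp s] at hx
      rcases List.mem_append.mp hx with hx | hx
      · exact h2 x hx
      · exact List.mem_takeWhile_imp (List.mem_reverse.mp hx)
    exact h3 c hc
  · intro h
    have h2 : ∀ x ∈ PySem.Chars.rstrip s, PySem.Chars.isspace x := by
      intro x hx
      apply h
      rw [pvRstrip_decomp s]
      exact List.mem_append.mpr (Or.inl hx)
    have : PySem.Chars.lstrip (PySem.Chars.rstrip s) = [] := by
      rw [PySem.Chars.lstrip]
      exact List.dropWhile_eq_nil_iff.mpr h2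
    rw [PySem.Chars.strip, this]
    rfl

theorem pvGo_mem_ne_nil (s : List Char) : ∀ (cur : List Char) (acc : List (List Char)),
    (∀ w ∈ acc, w ≠ []) → ∀ w ∈ PySem.Chars.split₀.go s cur acc, w ≠ [] := by
  induction s with
  | nil =>
    intro cur acc hacc w hw
    by_cases h : cur.isEmpty
    · rw [PySem.Chars.split₀.go] at hw
      simp only [h, if_true] at hw
      exact hacc w (List.mem_reverse.mp hw)
    · rw [PySem.Chars.split₀.go] at hw
      simp only [h, Bool.false_eq_true, if_false] at hw
      rcases List.mem_cons.mp (List.mem_reverse.mp hw) with rfl | hw'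
      · simp only [ne_eq, List.reverse_eq_nil_iff]
        simpa [List.isEmpty_iff] using h
      · exact hacc w hw'
  | cons c s ih =>
    intro cur acc hacc w hw
    by_cases hc : PySem.Chars.isspace c
    · by_cases h : cur.isEmpty
      · rw [PySem.Chars.split₀.go] at hw
        simp only [hc, h, if_true] at hw
        exact ih [] acc hacc w hw
      · rw [PySem.Chars.split₀.go] at hw
        simp only [hc, h, if_true, Bool.false_eq_true, if_false] at hw
        refine ih [] (cur.reverse :: acc) ?_ w hw
        intro x hx
        rcases List.mem_cons.mp hx with rfl | hx'
        · simp only [ne_eq, List.reverse_eq_nil_iff]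
          simpa [List.isEmpty_iff] using h
        · exact hacc x hx'
    · rw [PySem.Chars.split₀.go] at hw
      simp only [hc, Bool.false_eq_true, if_false] at hw
      exact ih (c :: cur) acc hacc w hw

theorem pvMem_split₀_ne_nil (s : List Char) (w : List Char)
    (hw : w ∈ PySem.Chars.split₀ s) : w ≠ [] :=
  pvGo_mem_ne_nil s [] [] (by simp) w hw

-- ---- lifted to String ----

theorem pvStrSplit_join_space (blks : List String) :
    PySem.Str.split₀ (PySem.Str.join " " blks) = blks.flatMap PySem.Str.split₀ := by
  simp only [PySem.Str.split₀, PySem.Str.join, String.toList_ofList]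
  rw [show (" " : String).toList = [' '] from rfl, pvSplit_join_space,
    List.flatMap_map, List.map_flatMap]
  rfl

theorem pvStrStripped_eq_empty_iff (s : String) :
    PySem.Str.strip (PySem.Str.rstrip s) = "" ↔ PySem.Str.split₀ s = [] := by
  rw [PySem.Str.strip, PySem.Str.rstrip, String.toList_ofList, PySem.Str.split₀]
  constructor
  · intro h
    have h' : PySem.Chars.strip (PySem.Chars.rstrip s.toList) = [] := by
      simpa using congrArg String.toList h
    rw [List.map_eq_nil_iff, pvSplit_eq_nil_iff]
    exact (pvStrip_rstrip_eq_nil_iff _).mp h'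
  · intro h
    rw [List.map_eq_nil_iff, pvSplit_eq_nil_iff] at h
    rw [(pvStrip_rstrip_eq_nil_iff _).mpr h]

theorem pvStrSplit_stripped (s : String) :
    PySem.Str.split₀ (PySem.Str.strip (PySem.Str.rstrip s)) = PySem.Str.split₀ s := by
  rw [PySem.Str.strip, PySem.Str.rstrip, String.toList_ofList, PySem.Str.split₀,
    String.toList_ofList, pvSplit_strip, pvSplit_rstrip, PySem.Str.split₀]

theorem pvStrMem_split₀_ne_empty (s : String) (w : String)
    (hw : w ∈ PySem.Str.split₀ s) : w ≠ "" := by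
  rw [PySem.Str.split₀] at hw
  rcases List.mem_map.mp hw with ⟨u, hu, rfl⟩
  intro h
  exact pvMem_split₀_ne_nil _ u hu (by simpa using congrArg String.toList h)

theorem pvStrJoin_ne_empty (w : List String) (hne : w ≠ []) (hall : ∀ x ∈ w, x ≠ "") :
    PySem.Str.join " " w ≠ "" := by
  cases w with
  | nil => exact absurd rfl hne
  | cons a l =>
    have ha : a.toList ≠ [] := by
      intro h
      exact hall a List.mem_cons_self (by
        have := congrArg String.ofList h
        simpa [String.ofList_toList] using this)
    intro h
    have h' := congrArg String.toList h
    rw [PySem.Str.join, String.toList_ofList] at h'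
    simp only [List.map_cons] at h'
    cases l with
    | nil =>
      rw [List.map_nil, PySem.Chars.join_singleton] at h'
      simp at h'
      exact hall a List.mem_cons_self h'
    | cons b t =>
      rw [List.map_cons, PySem.Chars.join_cons_cons] at h'
      have h2 : a.toList = [] := by
        have h3 : a.toList ++ (" ".toList ++
            PySem.Chars.join " ".toList (b.toList :: t.map String.toList)) = [] := by
          simp only [List.append_assoc] at h'
          simp at h'
        exact (List.append_eq_nil_iff.mp h3).1
      exact ha h2

-- ---- the machine equivalence ----

-- A's loop body on the fetched line
def pvStepA (st : List String × List String) (l0 : String) : List String × List String :=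
  let l := PySem.Str.rstrip l0
  let stripped := PySem.Str.strip l
  if stripped = "" then
    if st.2 ≠ [] then
      let text := PySem.Str.join " " st.2
      let text := PySem.Str.join " " (PySem.Str.split₀ text)
      (if text ≠ "" then st.1 ++ [text] else st.1, ([] : List String))
    else st
  else (st.1, st.2 ++ [stripped])

-- A's trailing flush
def pvFinishA (st : List String × List String) : List String :=
  if st.2 ≠ [] then
    let text := PySem.Str.join " " st.2
    let text := PySem.Str.join " " (PySem.Str.split₀ text)
    if text ≠ "" then st.1 ++ [text] else st.1
  else st.1

-- the flushed paragraph is the space-join of the block's words, and it is non-empty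
theorem pvFlush_text (blk : List String) (hne : blk ≠ [])
    (hinv : ∀ b ∈ blk, PySem.Str.split₀ b ≠ []) :
    PySem.Str.join " " (PySem.Str.split₀ (PySem.Str.join " " blk))
      = PySem.Str.join " " (blk.flatMap PySem.Str.split₀) ∧
    PySem.Str.join " " (blk.flatMap PySem.Str.split₀) ≠ "" := by
  constructor
  · rw [pvStrSplit_join_space]
  · apply pvStrJoin_ne_empty
    · cases blk with
      | nil => exact absurd rfl hne
      | cons b l =>
        rw [List.flatMap_cons]
        intro h
        rcases List.append_eq_nil_iff.mp h with ⟨h1, _⟩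
        exact hinv b List.mem_cons_self h1
    · intro x hx
      rcases List.mem_flatMap.mp hx with ⟨b, _, hxb⟩
      exact pvStrMem_split₀_ne_empty b x hxb

theorem pvMain (sel : List String) :
    (∀ paras, pvFinishA (sel.foldl pvStepA (paras, [])) =
        paras ++ pvScanRuns (sel.map PySem.Str.split₀)) ∧
    (∀ paras blk, blk ≠ [] → (∀ b ∈ blk, PySem.Str.split₀ b ≠ []) →
      pvFinishA (sel.foldl pvStepA (paras, blk)) =
        paras ++ (PySem.Str.join " "
            (pvTakeRun (blk.flatMap PySem.Str.split₀) (sel.map PySem.Str.split₀)).1 ::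
          pvScanRuns (pvTakeRun (blk.flatMap PySem.Str.split₀) (sel.map PySem.Str.split₀)).2)) := by
  induction sel with
  | nil =>
    constructor
    · intro paras
      simp [pvFinishA, pvScanRuns]
    · intro paras blk hne hinv
      obtain ⟨htext, hne'⟩ := pvFlush_text blk hne hinv
      simp only [List.foldl_nil, List.map_nil, pvTakeRun, pvFinishA, hne, ne_eq,
        not_false_iff, if_true]
      rw [htext]
      simp [hne', pvScanRuns]
  | cons s sel ih =>
    have hstep_nil : ∀ (paras : List String), PySem.Str.split₀ s = [] →
        pvStepA (paras, ([] : List String)) s = (paras, []) := by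
      intro paras hb
      rw [pvStepA]
      simp [(pvStrStripped_eq_empty_iff s).mpr hb]
    have hstripped_ne : PySem.Str.split₀ s ≠ [] →
        PySem.Str.strip (PySem.Str.rstrip s) ≠ "" := by
      intro hb h
      exact hb ((pvStrStripped_eq_empty_iff s).mp h)
    constructor
    · intro paras
      by_cases hb : PySem.Str.split₀ s = []
      · rw [List.foldl_cons, hstep_nil paras hb, ih.1 paras]
        rw [List.map_cons, hb]
        rw [show pvScanRuns ([] :: sel.map PySem.Str.split₀)
              = pvScanRuns (sel.map PySem.Str.split₀) by rw [pvScanRuns]; simp]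
      · rw [List.foldl_cons]
        have : pvStepA (paras, []) s = (paras, [PySem.Str.strip (PySem.Str.rstrip s)]) := by
          rw [pvStepA]
          simp [hstripped_ne hb]
        rw [this, ih.2 paras [PySem.Str.strip (PySem.Str.rstrip s)] (by simp)
          (by intro b hb'; simp at hb'; subst hb'; rw [pvStrSplit_stripped]; exact hb)]
        have hW : ([PySem.Str.strip (PySem.Str.rstrip s)] : List String).flatMap
            PySem.Str.split₀ = PySem.Str.split₀ s := by
          simp [pvStrSplit_stripped]
        rw [hW, List.map_cons]
        rw [pvScanRuns]
        simp [hb]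
    · intro paras blk hne hinv
      by_cases hb : PySem.Str.split₀ s = []
      · obtain ⟨htext, hne'⟩ := pvFlush_text blk hne hinv
        have hstep : pvStepA (paras, blk) s
            = (paras ++ [PySem.Str.join " " (blk.flatMap PySem.Str.split₀)], []) := by
          rw [pvStepA]
          simp only [(pvStrStripped_eq_empty_iff s).mpr hb, if_true, ne_eq, hne,
            not_false_eq_true, htext, hne']
        rw [List.foldl_cons, hstep, ih.1]
        rw [List.map_cons, hb]
        rw [show pvTakeRun (blk.flatMap PySem.Str.split₀) ([] :: sel.map PySem.Str.split₀)
              = (blk.flatMap PySem.Str.split₀, [] :: sel.map PySem.Str.split₀) by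
            rw [pvTakeRun]; simp]
        rw [show pvScanRuns ([] :: sel.map PySem.Str.split₀)
              = pvScanRuns (sel.map PySem.Str.split₀) by rw [pvScanRuns]; simp]
        simp
      · rw [List.foldl_cons]
        have hstep : pvStepA (paras, blk) s
            = (paras, blk ++ [PySem.Str.strip (PySem.Str.rstrip s)]) := by
          rw [pvStepA]
          simp [hstripped_ne hb]
        rw [hstep, ih.2 paras (blk ++ [PySem.Str.strip (PySem.Str.rstrip s)]) (by simp)
          (by
            intro b hb'
            rcases List.mem_append.mp hb' with h | h
            · exact hinv b h
            · simp at h; subst h; rw [pvStrSplit_stripped]; exact hb)]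
        have hW : (blk ++ [PySem.Str.strip (PySem.Str.rstrip s)]).flatMap PySem.Str.split₀
            = blk.flatMap PySem.Str.split₀ ++ PySem.Str.split₀ s := by
          simp [pvStrSplit_stripped]
        rw [hW, List.map_cons]
        rw [show pvTakeRun (blk.flatMap PySem.Str.split₀)
              (PySem.Str.split₀ s :: sel.map PySem.Str.split₀)
            = pvTakeRun (blk.flatMap PySem.Str.split₀ ++ PySem.Str.split₀ s)
              (sel.map PySem.Str.split₀) by rw [pvTakeRun]; simp [hb]]

-- ===== VERDICT (by name: the statement is the Claim_ definition above) =====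
theorem gather_paragraphs_spec : Claim_equal_gather_paragraphs := by
  intro lines start stop _ _
  show gather_paragraphs lines start stop = gather_paragraphs_alt lines start stop
  rw [show gather_paragraphs lines start stop
      = pvFinishA ((PySem.List.pyRange start (min stop (lines.length : Int)) 1).foldl
          (fun st i => pvStepA st (PySem.List.pyGetD lines i "")) ([], [])) from rfl]
  rw [← List.foldl_map (f := fun i => PySem.List.pyGetD lines i "") (g := pvStepA)]
  rw [(pvMain _).1 []]
  rw [gather_paragraphs_alt]
  simp [List.map_map, Function.comp_def]
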